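-- pv_equiv track=rewrite | github.com/axd353/WhenNoPathsLeadToRome | utils/wrangle_derivations2.py | group_branches_by_derivation
-- ===== SOURCE A (Python) =====
-- from typing import Dict, List, Set, Tuple, Any
--
-- def group_branches_by_derivation(
--     derivation_chain: Dict[int,Dict[Any,str]],
--     branch_results: Dict[int,str]
-- ) -> Dict[str,List[int]]:
--     """
--     Group branch indices by their stringified derivation dict.
--     """
--     groups: Dict[str,List[int]] = {}
--     for idx, deriv in derivation_chain.items():
--         key = str(deriv)
--         groups.setdefault(key, []).append(idx)
--     return groups
-- ===== SOURCE B (Python) =====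
-- def group_branches_by_derivation(derivation_chain, branch_results):
--     """Group branch indices by their stringified derivation dict
--     (groups listed in order of first appearance in the chain)."""
--     keyed = [(str(deriv), idx) for idx, deriv in derivation_chain.items()]
--     order = list(dict.fromkeys(k for k, _ in keyed))
--     srt = sorted(keyed, key=lambda p: p[0])  # stable: within a key, chain order kept
--     groups = {}
--     i = 0
--     n = len(srt)
--     while i < n:  # scan each maximal run of equal keys
--         k = srt[i][0]
--         run = []
--         while i < n and srt[i][0] == k:
--             run.append(srt[i][1])
--             i += 1
--         groups[k] = run
--     return {k: groups[k] for k in order}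
-- ===== Notes on version B (the rewrite author's own statement) =====
-- stated objective: alternative
-- what changed: B replaces A's single setdefault-accumulation pass with a sort-then-scan strategy: it materialises (str(deriv), idx) pairs once, stably sorts them by key, emits each group by scanning maximal runs of equal keys, and lists the groups in first-appearance order.
import Mathlib
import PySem

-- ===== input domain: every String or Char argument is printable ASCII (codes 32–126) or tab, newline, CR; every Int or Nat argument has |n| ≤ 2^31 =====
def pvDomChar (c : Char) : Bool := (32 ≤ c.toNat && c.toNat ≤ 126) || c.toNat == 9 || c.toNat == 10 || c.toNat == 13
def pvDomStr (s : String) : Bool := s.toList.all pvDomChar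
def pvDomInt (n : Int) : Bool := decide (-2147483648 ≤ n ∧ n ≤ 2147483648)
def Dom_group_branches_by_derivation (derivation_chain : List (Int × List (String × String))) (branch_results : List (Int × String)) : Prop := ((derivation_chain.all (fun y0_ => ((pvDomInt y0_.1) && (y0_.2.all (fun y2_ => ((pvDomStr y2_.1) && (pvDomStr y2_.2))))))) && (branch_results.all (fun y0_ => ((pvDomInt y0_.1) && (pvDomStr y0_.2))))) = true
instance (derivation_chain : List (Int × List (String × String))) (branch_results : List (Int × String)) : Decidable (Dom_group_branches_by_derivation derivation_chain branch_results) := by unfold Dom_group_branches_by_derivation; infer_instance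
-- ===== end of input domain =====

-- B groups by the same str(deriv) key via a different strategy: stable sort by key, one run-scan emitting each group, groups listed in first-appearance order; alternative decomposition, same results.


-- ===== PORT A =====
-- A-side helper: Python repr(s) for printable-ASCII/tab/newline/CR strings (exact on that domain)

def pyReprStr (s : String) : String :=
  let cs := s.toList
  let q : Char := if cs.contains '\'' && !cs.contains '"' then '"' else '\''
  String.ofList (q :: cs.flatMap (fun c =>
    if c = '\\' then ['\\', '\\']
    else if c = Char.ofNat 9 then ['\\', 't']
    else if c = Char.ofNat 10 then ['\\', 'n']
    else if c = Char.ofNat 13 then ['\\', 'r']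
    else if c = q then ['\\', q]
    else [c]) ++ [q])

-- A-side helper: Python str(deriv) for a dict given as an association list (duplicate keys collapse as in dict construction)
def pyStrDict (l : List (String × String)) : String :=
  "{" ++ PySem.Str.join ", " ((PySem.Dict.ofList l).items.map
    (fun p => pyReprStr p.1 ++ ": " ++ pyReprStr p.2)) ++ "}"


def group_branches_by_derivation (derivation_chain : List (Int × List (String × String))) (branch_results : List (Int × String)) : List (String × List Int) :=
  ((PySem.Dict.ofList derivation_chain).items.foldl
    (fun groups p => groups.modify (pyStrDict p.2) ([] : List Int) (· ++ [p.1]))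
    PySem.Dict.empty).items

-- ===== PORT B =====
-- B-side helpers: repr built chunk by chunk with a fold; entries joined left to right with a fold
def escChunk (q : Char) (c : Char) : String :=
  if c = '\\' then "\\\\"
  else if c.toNat = 9 then "\\t"
  else if c.toNat = 10 then "\\n"
  else if c.toNat = 13 then "\\r"
  else if c = q then String.ofList ['\\', q]
  else String.singleton c

def reprB (s : String) : String :=
  let cs := s.toList
  let q : Char := if 0 < cs.countP (· = '\'') && cs.countP (· = '"') = 0 then '"' else '\''
  (cs.foldl (fun acc c => acc ++ escChunk q c) (String.singleton q)).push q

def braceJoin : List String → String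
  | [] => "{}"
  | e :: rest => "{" ++ rest.foldl (fun acc x => acc ++ ", " ++ x) e ++ "}"

def strDictB (l : List (String × String)) : String :=
  braceJoin ((PySem.Dict.ofList l).items.map (fun p => reprB p.1 ++ ": " ++ reprB p.2))


-- Source B's inner while loop: scan off one maximal run of equal keys, recurse on the rest
def runScan : List (String × Int) → List (String × List Int)
  | [] => []
  | (k, i) :: t =>
      (k, i :: (t.takeWhile (fun p => p.1 == k)).map Prod.snd) ::
      runScan (t.dropWhile (fun p => p.1 == k))
  termination_by l => l.length
  decreasing_by
    simp only [List.length_cons]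
    exact Nat.lt_succ_of_le (List.length_dropWhile_le _ _)

def group_branches_by_derivation_alt (derivation_chain : List (Int × List (String × String))) (branch_results : List (Int × String)) : List (String × List Int) :=
  let keyed := (PySem.Dict.ofList derivation_chain).items.map (fun p => (strDictB p.2, p.1))
  let order := PySem.List.dedup (keyed.map Prod.fst)
  let srt := PySem.List.sorted keyed (fun p => p.1)
  let groups := (runScan srt).foldl (fun d r => d.insert r.1 r.2) PySem.Dict.empty
  -- groups[k] in the final dict comprehension never raises (every k of order is a key of groups): getD is value-exact here
  order.map (fun k => (k, groups.getD k []))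

-- ===== PRECONDITION & SPEC =====
def Spec_group_branches_by_derivation (derivation_chain : List (Int × List (String × String))) (branch_results : List (Int × String)) (out : List (String × List Int)) : Prop := out = group_branches_by_derivation_alt derivation_chain branch_results
instance (derivation_chain : List (Int × List (String × String))) (branch_results : List (Int × String)) (out : List (String × List Int)) : Decidable (Spec_group_branches_by_derivation derivation_chain branch_results out) := by unfold Spec_group_branches_by_derivation; infer_instance

-- ===== CLAIM (what is proved, stated in full; the proofs are below) =====
def Claim_equal_group_branches_by_derivation : Prop := ∀ (derivation_chain : List (Int × List (String × String))) (branch_results : List (Int × String)), Dom_group_branches_by_derivation derivation_chain branch_results → Spec_group_branches_by_derivation derivation_chain branch_results (group_branches_by_derivation derivation_chain branch_results)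

-- ===== LEMMAS AND PROOFS =====

-- the B-side string helpers agree with the A-side ones
theorem quote_eq (cs : List Char) :
    (if 0 < cs.countP (· = '\'') && cs.countP (· = '"') = 0 then '"' else '\'')
    = (if cs.contains '\'' && !cs.contains '"' then '"' else '\'') := by
  by_cases h1 : '\'' ∈ cs <;> by_cases h2 : '"' ∈ cs <;>
    simp [h1, h2, List.countP_eq_zero, List.countP_pos_iff]

theorem char_eq_ofNat (c : Char) (n : Nat) (h : (Char.ofNat n).toNat = n) :
    (c = Char.ofNat n) ↔ (c.toNat = n) := by
  constructor
  · intro hc; rw [hc, h]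
  · intro hc; conv_lhs => rw [← Char.ofNat_toNat c]
    rw [hc]

theorem escChunk_toList (q c : Char) :
    (escChunk q c).toList
    = (if c = '\\' then ['\\', '\\']
       else if c = Char.ofNat 9 then ['\\', 't']
       else if c = Char.ofNat 10 then ['\\', 'n']
       else if c = Char.ofNat 13 then ['\\', 'r']
       else if c = q then ['\\', q]
       else [c]) := by
  rw [escChunk]
  simp only [char_eq_ofNat c 9 (by decide), char_eq_ofNat c 10 (by decide),
    char_eq_ofNat c 13 (by decide)]
  split_ifs <;> simp

theorem foldl_chunks (q : Char) (cs : List Char) : ∀ (init : String),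
    (cs.foldl (fun acc c => acc ++ escChunk q c) init).toList
    = init.toList ++ cs.flatMap (fun c => (escChunk q c).toList) := by
  induction cs with
  | nil => intro init; simp
  | cons c t ih => intro init; rw [List.foldl_cons, ih]; simp

theorem reprB_eq (s : String) : reprB s = pyReprStr s := by
  rw [reprB, pyReprStr]
  simp only [quote_eq]
  rw [← String.toList_inj, String.push_eq_append]
  simp [foldl_chunks, escChunk_toList]

theorem join_fold (t : List String) : ∀ (e : String),
    t.foldl (fun acc x => acc ++ ", " ++ x) e = PySem.Str.join ", " (e :: t) := by
  induction t with
  | nil =>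
    intro e
    rw [← String.toList_inj, PySem.Str.toList_join]
    simp [PySem.Chars.join_singleton]
  | cons b t ih =>
    intro e
    rw [List.foldl_cons, ih]
    rw [← String.toList_inj, PySem.Str.toList_join, PySem.Str.toList_join]
    cases t with
    | nil => simp [PySem.Chars.join_singleton, PySem.Chars.join_cons_cons]
    | cons c t' => simp [PySem.Chars.join_cons_cons]

theorem strDictB_eq (l : List (String × String)) : strDictB l = pyStrDict l := by
  rw [strDictB, pyStrDict]
  simp only [reprB_eq]
  cases h : (PySem.Dict.ofList l).items.map (fun p => pyReprStr p.1 ++ ": " ++ pyReprStr p.2) with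
  | nil =>
    rw [braceJoin, ← String.toList_inj, ]
    simp [PySem.Str.toList_join, PySem.Chars.join_nil]
  | cons e rest => rw [braceJoin, join_fold rest e]


-- A's setdefault/append accumulation, characterised: first-occurrence keys, each paired with its filtered indices
theorem grouped_items (l : List (Int × List (String × String))) :
    (l.foldl (fun groups p => groups.modify (pyStrDict p.2) ([] : List Int) (· ++ [p.1]))
      PySem.Dict.empty).items
    = (PySem.List.dedup ((l.map (fun p => (pyStrDict p.2, p.1))).map Prod.fst)).map
        (fun k => (k, ((l.map (fun p => (pyStrDict p.2, p.1))).filter (fun q => q.1 == k)).map Prod.snd)) := by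
  have hnd : ((l.foldl (fun groups p => groups.modify (pyStrDict p.2) ([] : List Int) (· ++ [p.1]))
      PySem.Dict.empty)).keys.Nodup :=
    PySem.Dict.nodup_keys_foldl_modify_key l (fun p => pyStrDict p.2) [] (fun _ p => (· ++ [p.1]))
      PySem.Dict.empty (by simp)
  rw [PySem.Dict.items_eq_map_keys _ hnd ([] : List Int)]
  rw [PySem.Dict.keys_foldl_modify_key]
  have hkeys : PySem.Set.update (PySem.Dict.empty : PySem.Dict String (List Int)).keys
      (l.map (fun p => pyStrDict p.2))
      = PySem.List.dedup ((l.map (fun p => (pyStrDict p.2, p.1))).map Prod.fst) := by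
    simp [PySem.Dict.keys_empty, PySem.Set.update_nil_left, List.map_map, Function.comp_def]
  rw [hkeys]
  apply List.map_congr_left
  intro k _
  congr 1
  have hfold : l.foldl (fun groups p => groups.modify (pyStrDict p.2) ([] : List Int) (· ++ [p.1]))
      PySem.Dict.empty
      = (l.map (fun p => (pyStrDict p.2, p.1))).foldl
          (fun groups q => groups.modify q.1 ([] : List Int) (· ++ [q.2])) PySem.Dict.empty := by
    rw [List.foldl_map]
  rw [hfold, PySem.Dict.getD_foldl_modify_append]
  simp [List.filter_map, List.map_map, Function.comp_def]

-- stability of the insertion step: inserting x never reorders the elements of any one key class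
theorem filter_insertBy (x : String × Int) (ys : List (String × Int))
    (hs : ys.Pairwise (fun a b => a.1 ≤ b.1)) (c : String) :
    (PySem.List.insertBy (fun a b => decide (a.1 < b.1)) x ys).filter (fun p => p.1 == c)
    = ys.filter (fun p => p.1 == c) ++ List.filter (fun p => p.1 == c) [x] := by
  induction ys with
  | nil => simp [PySem.List.insertBy]
  | cons y t ih =>
    rw [List.pairwise_cons] at hs
    by_cases h : x.1 < y.1
    · have hstep : PySem.List.insertBy (fun a b => decide (a.1 < b.1)) x (y :: t)
          = x :: y :: t := by simp [PySem.List.insertBy, h]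
      rw [hstep]
      by_cases hc : x.1 = c
      · have hnil : (y :: t).filter (fun p => p.1 == c) = [] := by
          apply List.filter_eq_nil_iff.2
          intro p hp
          have : y.1 ≤ p.1 := by
            rcases List.mem_cons.1 hp with h1 | h1
            · exact h1 ▸ le_refl _
            · exact hs.1 p h1
          have : c < p.1 := lt_of_lt_of_le (hc ▸ h) this
          simp [(ne_of_lt this).symm]
        simp [hnil, hc]
      · simp [hc, List.filter_cons]
    · have hstep : PySem.List.insertBy (fun a b => decide (a.1 < b.1)) x (y :: t)
          = y :: PySem.List.insertBy (fun a b => decide (a.1 < b.1)) x t := by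
        simp [PySem.List.insertBy, h]
      rw [hstep]
      rw [List.filter_cons, List.filter_cons, ih hs.2]
      by_cases hy : y.1 = c <;> simp [hy]

-- a stable sort by key keeps each key class exactly as it appears in the input
theorem filter_sorted (l : List (String × Int)) (c : String) :
    (PySem.List.sorted l (fun p => p.1)).filter (fun p => p.1 == c)
    = l.filter (fun p => p.1 == c) := by
  rw [PySem.List.sorted_eq_foldl_insertBy]
  induction l using List.reverseRecOn with
  | nil => rfl
  | append_singleton l x ih =>
    rw [List.foldl_append, List.foldl_cons, List.foldl_nil]
    have hp : (l.foldl (fun acc x => PySem.List.insertBy (fun a b => decide (a.1 < b.1)) x acc)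
        []).Pairwise (fun a b => a.1 ≤ b.1) := by
      rw [← PySem.List.sorted_eq_foldl_insertBy]
      exact PySem.List.sorted_pairwise l (fun p => p.1)
    rw [filter_insertBy x _ hp c, ih, List.filter_append]

-- after dropping the k-run from a sorted tail whose keys all dominate k, no key k remains
theorem keys_dropWhile_ne (k : String) (t : List (String × Int))
    (hs : t.Pairwise (fun a b => a.1 ≤ b.1)) (hge : ∀ p ∈ t, k ≤ p.1) :
    ∀ p ∈ t.dropWhile (fun q => q.1 == k), p.1 ≠ k := by
  induction t with
  | nil => simp
  | cons a t ih =>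
    rw [List.pairwise_cons] at hs
    by_cases h : a.1 = k
    · rw [List.dropWhile_cons_of_pos (by simp [h])]
      exact ih hs.2 (fun p hp => hge p (List.mem_cons_of_mem a hp))
    · rw [List.dropWhile_cons_of_neg (by simp [h])]
      intro p hp
      have hak : k < a.1 := lt_of_le_of_ne (hge a (List.mem_cons_self)) (Ne.symm h)
      rcases List.mem_cons.1 hp with h1 | h1
      · exact h1 ▸ h
      · exact (ne_of_lt (lt_of_lt_of_le hak (hs.1 p h1))).symm

-- every key of a runScan result is a key of the input
theorem runScan_keys_subset (s : List (String × Int)) :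
    ∀ q ∈ runScan s, q.1 ∈ s.map Prod.fst := by
  induction s using runScan.induct with
  | case1 => simp [runScan]
  | case2 k i t ih =>
    intro q hq
    rw [runScan] at hq
    rcases List.mem_cons.1 hq with h1 | h1
    · simp [h1]
    · have := ih q h1
      exact List.mem_cons_of_mem _ (((List.dropWhile_sublist _).map Prod.fst).mem this)

-- on a sorted list, runScan's keys are distinct
theorem runScan_keys_nodup (s : List (String × Int))
    (hs : s.Pairwise (fun a b => a.1 ≤ b.1)) :
    ((runScan s).map Prod.fst).Nodup := by
  induction s using runScan.induct with
  | case1 => simp [runScan]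
  | case2 k i t ih =>
    rw [List.pairwise_cons] at hs
    rw [runScan]
    simp only [List.map_cons, List.nodup_cons]
    constructor
    · intro hk
      rcases List.mem_map.1 hk with ⟨q, hq, hq1⟩
      have := runScan_keys_subset _ q hq
      rcases List.mem_map.1 this with ⟨p, hp, hp1⟩
      exact keys_dropWhile_ne k t hs.2 (fun p hp => hs.1 p hp) p hp (hp1.trans hq1)
    · exact ih (hs.2.sublist (List.dropWhile_sublist _))

-- on a sorted list, the run of any present key is exactly its filtered class
theorem mem_runScan (s : List (String × Int))
    (hs : s.Pairwise (fun a b => a.1 ≤ b.1)) (k : String) (hk : k ∈ s.map Prod.fst) :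
    (k, (s.filter (fun p => p.1 == k)).map Prod.snd) ∈ runScan s := by
  induction s using runScan.induct with
  | case1 => simp at hk
  | case2 k0 i t ih =>
    rw [List.pairwise_cons] at hs
    rw [runScan]
    by_cases h : k = k0
    · subst h
      have htw : (t.takeWhile (fun p => p.1 == k)).filter (fun p => p.1 == k)
          = t.takeWhile (fun p => p.1 == k) :=
        List.filter_eq_self.2 (fun p hp => List.mem_takeWhile_imp (p := fun q : String × Int => q.1 == k) hp)
      have hdw : (t.dropWhile (fun p => p.1 == k)).filter (fun p => p.1 == k) = [] :=
        List.filter_eq_nil_iff.2 (fun p hp => by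
          simp [keys_dropWhile_ne k t hs.2 (fun p hp => hs.1 p hp) p hp])
      have ht : t.filter (fun p => p.1 == k)
          = t.takeWhile (fun p => p.1 == k) := by
        conv_lhs => rw [← List.takeWhile_append_dropWhile (p := fun p => p.1 == k) (l := t)]
        rw [List.filter_append, htw, hdw, List.append_nil]
      rw [List.filter_cons_of_pos (by simp), ht]
      simp
    · apply List.mem_cons_of_mem
      have hkt : k ∈ (t.dropWhile (fun p => p.1 == k0)).map Prod.fst := by
        rcases List.mem_map.1 hk with ⟨p, hp, hp1⟩
        rcases List.mem_cons.1 hp with h1 | h1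
        · exact absurd (h1 ▸ hp1 : (k0, i).1 = k).symm h
        · have : p ∈ t.takeWhile (fun q => q.1 == k0) ∨ p ∈ t.dropWhile (fun q => q.1 == k0) := by
            have := List.takeWhile_append_dropWhile (p := fun q => q.1 == k0) (l := t)
            rw [← this] at h1
            exact List.mem_append.1 h1
          rcases this with h2 | h2
          · have := List.mem_takeWhile_imp h2
            rw [hp1] at this
            exact absurd (by simpa using this) h
          · exact List.mem_map.2 ⟨p, h2, hp1⟩
      have hfix : ((k0, i) :: t).filter (fun p => p.1 == k)
          = (t.dropWhile (fun p => p.1 == k0)).filter (fun p => p.1 == k) := by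
        rw [List.filter_cons_of_neg (by simp [Ne.symm h])]
        conv_lhs => rw [← List.takeWhile_append_dropWhile (p := fun p => p.1 == k0) (l := t)]
        rw [List.filter_append]
        have : (t.takeWhile (fun p => p.1 == k0)).filter (fun p => p.1 == k) = [] :=
          List.filter_eq_nil_iff.2 (fun p hp => by
            have h2 : p.1 = k0 := by simpa using List.mem_takeWhile_imp hp
            simpa [h2] using Ne.symm h)
        rw [this, List.nil_append]
      rw [hfix]
      exact ih (hs.2.sublist (List.dropWhile_sublist _)) hkt

-- the run dict built by B answers every present key with its filtered class
theorem getD_groups (srt : List (String × Int))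
    (hs : srt.Pairwise (fun a b => a.1 ≤ b.1)) (k : String) (hk : k ∈ srt.map Prod.fst) :
    ((runScan srt).foldl (fun d r => d.insert r.1 r.2) PySem.Dict.empty).getD k []
    = (srt.filter (fun p => p.1 == k)).map Prod.snd := by
  have hitems : ((runScan srt).foldl (fun d r => d.insert r.1 r.2) PySem.Dict.empty).items
      = runScan srt := by
    have := PySem.Dict.items_foldl_insert_fresh (runScan srt) Prod.fst Prod.snd
      PySem.Dict.empty (fun a _ => by simp) (runScan_keys_nodup srt hs)
    simpa using this
  have hknd : ((runScan srt).foldl (fun d r => d.insert r.1 r.2) PySem.Dict.empty).keys.Nodup := by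
    simp only [PySem.Dict.keys, hitems]
    exact runScan_keys_nodup srt hs
  exact PySem.Dict.getD_of_mem_items _ (by rw [hitems]; exact mem_runScan srt hs k hk) hknd []

theorem group_branches_by_derivation_eq (derivation_chain : List (Int × List (String × String))) (branch_results : List (Int × String)) :
    group_branches_by_derivation derivation_chain branch_results
    = group_branches_by_derivation_alt derivation_chain branch_results := by
  unfold group_branches_by_derivation group_branches_by_derivation_alt
  simp only [strDictB_eq]
  rw [grouped_items]
  apply List.map_congr_left
  intro k hk
  congr 1
  have hk' : k ∈ ((PySem.Dict.ofList derivation_chain).items.map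
      (fun p => (pyStrDict p.2, p.1))).map Prod.fst := by
    simpa [PySem.List.mem_dedup] using hk
  have hks : k ∈ (PySem.List.sorted ((PySem.Dict.ofList derivation_chain).items.map
      (fun p => (pyStrDict p.2, p.1))) (fun p => p.1)).map Prod.fst := by
    rcases List.mem_map.1 hk' with ⟨p, hp, hp1⟩
    exact List.mem_map.2 ⟨p, (PySem.List.mem_sorted _ _ _ _).2 hp, hp1⟩
  rw [getD_groups _ (PySem.List.sorted_pairwise _ _) k hks, filter_sorted]

-- ===== VERDICT (by name: the statement is the Claim_ definition above) =====
theorem group_branches_by_derivation_spec : Claim_equal_group_branches_by_derivation := by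
  intro dc br _
  exact group_branches_by_derivation_eq dc br
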